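-- pv_equiv track=rewrite | github.com/DiyaDeepak080/DNA-Pattern-Matcher | motif/parsing.py | parse_motif_to_symbol_sets
-- ===== SOURCE A (Python) =====
-- DNA_ALPHABET = {"A", "C", "G", "T"}
--
-- IUPAC = {
--     "A": {"A"}, "C": {"C"}, "G": {"G"}, "T": {"T"},
--     "R": {"A", "G"}, "Y": {"C", "T"}, "S": {"G", "C"}, "W": {"A", "T"},
--     "K": {"G", "T"}, "M": {"A", "C"},
--     "B": {"C", "G", "T"}, "D": {"A", "G", "T"}, "H": {"A", "C", "T"},
--     "V": {"A", "C", "G"}, "N": {"A", "C", "G", "T"}, ".": {"A", "C", "G", "T"},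
-- }
--
-- def parse_bracket_class(s, i):
--     assert s[i] == "["
--     j = i + 1
--     allowed = set()
--     if j >= len(s):
--         raise ValueError("Unclosed '[' in motif.")
--     while j < len(s) and s[j] != "]":
--         ch = s[j].upper()
--         if ch in IUPAC:
--             allowed |= IUPAC[ch]
--         elif ch in DNA_ALPHABET:
--             allowed.add(ch)
--         else:
--             raise ValueError(f"Unsupported character '{s[j]}' in bracket class.")
--         j += 1
--     if j >= len(s) or s[j] != "]":
--         raise ValueError("Unclosed '[' in motif.")
--     return allowed, j + 1
--
-- def parse_motif_to_symbol_sets(motif):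
--     s = motif.strip().upper()
--     i = 0
--     pieces = []
--     if not s:
--         raise ValueError("Motif is empty.")
--     while i < len(s):
--         ch = s[i]
--         if ch == "[":
--             allowed, i = parse_bracket_class(s, i)
--             pieces.append(allowed)
--         elif ch in IUPAC:
--             pieces.append(IUPAC[ch].copy())
--             i += 1
--         else:
--             raise ValueError(f"Unsupported motif character '{s[i]}' at position {i}.")
--     return pieces
-- ===== SOURCE B (Python) =====
-- IUPAC = {
--     "A": {"A"}, "C": {"C"}, "G": {"G"}, "T": {"T"},
--     "R": {"A", "G"}, "Y": {"C", "T"}, "S": {"G", "C"}, "W": {"A", "T"},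
--     "K": {"G", "T"}, "M": {"A", "C"},
--     "B": {"C", "G", "T"}, "D": {"A", "G", "T"}, "H": {"A", "C", "T"},
--     "V": {"A", "C", "G"}, "N": {"A", "C", "G", "T"}, ".": {"A", "C", "G", "T"},
-- }
--
-- def parse_motif_to_symbol_sets(motif):
--     s = motif.strip().upper()
--     if not s:
--         raise ValueError("Motif is empty.")
--     pieces = []
--     in_bracket = False
--     current = set()
--     for i, ch in enumerate(s):
--         if in_bracket:
--             if ch == "]":
--                 pieces.append(current)
--                 in_bracket = False
--             elif ch in IUPAC:
--                 current |= IUPAC[ch]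
--             else:
--                 raise ValueError(f"Unsupported character '{ch}' in bracket class.")
--         elif ch == "[":
--             in_bracket = True
--             current = set()
--         elif ch in IUPAC:
--             pieces.append(IUPAC[ch].copy())
--         else:
--             raise ValueError(f"Unsupported motif character '{ch}' at position {i}.")
--     if in_bracket:
--         raise ValueError("Unclosed '[' in motif.")
--     return pieces
-- ===== Notes on version B (the rewrite author's own statement) =====
-- stated objective: simpler
-- what changed: Replaces the outer loop plus the index-returning parse_bracket_class helper (nested while loop) with one flat state-machine pass over the string using an in_bracket flag and a current accumulator set; the dead DNA_ALPHABET branch (subsumed by the IUPAC table) disappears.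
import Mathlib
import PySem

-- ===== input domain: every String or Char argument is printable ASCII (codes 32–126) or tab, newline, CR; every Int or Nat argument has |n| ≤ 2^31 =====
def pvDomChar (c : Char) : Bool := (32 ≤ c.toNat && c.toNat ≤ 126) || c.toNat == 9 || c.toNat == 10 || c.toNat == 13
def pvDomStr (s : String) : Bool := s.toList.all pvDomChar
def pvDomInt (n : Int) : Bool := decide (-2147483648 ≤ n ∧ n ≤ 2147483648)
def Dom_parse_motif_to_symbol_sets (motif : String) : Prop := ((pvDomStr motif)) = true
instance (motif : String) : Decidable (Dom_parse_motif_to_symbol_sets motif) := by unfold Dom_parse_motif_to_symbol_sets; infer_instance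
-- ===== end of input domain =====

-- B replaces A's outer loop + index-returning bracket helper by one flat state-machine pass
-- (in_bracket flag + accumulator set); objective: simpler. Equal return values on Pre_.

-- ===== PORT A =====
-- the module constant IUPAC, as a lookup function (values are the sets in their literal order)
def pvIupac (c : Char) : Option (List String) :=
  match c with
  | 'A' => some ["A"]
  | 'C' => some ["C"]
  | 'G' => some ["G"]
  | 'T' => some ["T"]
  | 'R' => some ["A", "G"]
  | 'Y' => some ["C", "T"]
  | 'S' => some ["G", "C"]
  | 'W' => some ["A", "T"]
  | 'K' => some ["G", "T"]
  | 'M' => some ["A", "C"]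
  | 'B' => some ["C", "G", "T"]
  | 'D' => some ["A", "G", "T"]
  | 'H' => some ["A", "C", "T"]
  | 'V' => some ["A", "C", "G"]
  | 'N' => some ["A", "C", "G", "T"]
  | '.' => some ["A", "C", "G", "T"]
  | _   => none

-- parse_bracket_class, over the characters after the '[' (none = ValueError "Unclosed '['");
-- returns (allowed, characters after the ']')
def bracketLoopA : List Char → PySem.Set String → Option (PySem.Set String × List Char)
  | [], _ => none
  | c :: cs, acc =>
    if c = ']' then some (acc, cs)
    else
      match pvIupac (PySem.Chars.upperChar c) with
      | some v => bracketLoopA cs (PySem.Set.union acc v)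
      | none =>
        -- elif ch in DNA_ALPHABET (unreachable: DNA_ALPHABET ⊆ IUPAC keys)
        if PySem.Chars.upperChar c = 'A' ∨ PySem.Chars.upperChar c = 'C' ∨
           PySem.Chars.upperChar c = 'G' ∨ PySem.Chars.upperChar c = 'T' then
          bracketLoopA cs (PySem.Set.add acc (String.ofList [PySem.Chars.upperChar c]))
        else none

theorem bracketLoopA_spec :
    ∀ (cs : List Char) (acc al : PySem.Set String) (rest : List Char),
      bracketLoopA cs acc = some (al, rest) → rest.length < cs.length ∧ ∀ c ∈ rest, c ∈ cs := by
  intro cs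
  induction cs with
  | nil => intro acc al rest h; simp [bracketLoopA] at h
  | cons c cs ih =>
    intro acc al rest h
    by_cases h1 : c = ']'
    · subst h1
      simp [bracketLoopA] at h
      obtain ⟨rfl, rfl⟩ := h
      exact ⟨Nat.lt_succ_self _, fun d hd => List.mem_cons_of_mem _ hd⟩
    · simp only [bracketLoopA, if_neg h1] at h
      cases hp : pvIupac (PySem.Chars.upperChar c) with
      | some v =>
        rw [hp] at h
        obtain ⟨hlt, hmem⟩ := ih _ _ _ h
        exact ⟨Nat.lt_succ_of_lt hlt, fun d hd => List.mem_cons_of_mem _ (hmem d hd)⟩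
      | none =>
        rw [hp] at h
        by_cases hd : (PySem.Chars.upperChar c = 'A' ∨ PySem.Chars.upperChar c = 'C' ∨
            PySem.Chars.upperChar c = 'G' ∨ PySem.Chars.upperChar c = 'T')
        · rw [if_pos hd] at h
          obtain ⟨hlt, hmem⟩ := ih _ _ _ h
          exact ⟨Nat.lt_succ_of_lt hlt, fun d hd2 => List.mem_cons_of_mem _ (hmem d hd2)⟩
        · rw [if_neg hd] at h
          exact absurd h (by simp)

-- the main while loop of parse_motif_to_symbol_sets (none = ValueError)
def mainLoopA : List Char → List (PySem.Set String) → Option (List (PySem.Set String))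
  | [], pieces => some pieces
  | c :: cs, pieces =>
    if c = '[' then
      match h : bracketLoopA cs PySem.Set.empty with
      | none => none
      | some (al, rest) => mainLoopA rest (pieces ++ [al])
    else
      match pvIupac c with
      | some v => mainLoopA cs (pieces ++ [v])   -- IUPAC[ch].copy()
      | none => none
termination_by cs _ => cs.length
decreasing_by
  · exact Nat.lt_succ_of_lt (bracketLoopA_spec _ _ _ _ h).1
  · exact Nat.lt_succ_self _

def parse_motif_to_symbol_sets (motif : String) : List (List String) :=
  let s := (PySem.Str.upper (PySem.Str.strip motif)).toList
  if s.isEmpty then []                  -- raise ValueError("Motif is empty.")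
  else (mainLoopA s []).getD []         -- none = ValueError (excluded by Pre_)

-- ===== PORT B =====
-- one flat pass: in_bracket flag, current accumulator set, pieces
def flatB : List Char → Bool → PySem.Set String → List (PySem.Set String) →
    Option (List (PySem.Set String))
  | [], inB, _, pieces => if inB then none else some pieces   -- trailing "Unclosed '['" check
  | c :: cs, true, cur, pieces =>
    if c = ']' then flatB cs false cur (pieces ++ [cur])
    else
      match pvIupac c with
      | some v => flatB cs true (PySem.Set.union cur v) pieces
      | none => none                    -- "Unsupported character … in bracket class."
  | c :: cs, false, cur, pieces =>
    if c = '[' then flatB cs true PySem.Set.empty pieces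
    else
      match pvIupac c with
      | some v => flatB cs false cur (pieces ++ [v])
      | none => none                    -- "Unsupported motif character … at position i."

def parse_motif_to_symbol_sets_alt (motif : String) : List (List String) :=
  let s := (PySem.Str.upper (PySem.Str.strip motif)).toList
  if s.isEmpty then []                  -- raise ValueError("Motif is empty.")
  else (flatB s false PySem.Set.empty []).getD []   -- none = ValueError (excluded by Pre_)

-- ===== PRECONDITION & SPEC =====
-- Pre_ holds exactly when A returns normally: the stripped-uppercased motif is nonempty and is a
-- well-formed sequence of IUPAC symbols and closed bracket classes of IUPAC/DNA symbols
-- (A raises ValueError otherwise: empty motif, unsupported character, or unclosed '[').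
def pvIsIupacChar (c : Char) : Bool :=
  c = 'A' || c = 'C' || c = 'G' || c = 'T' || c = 'R' || c = 'Y' || c = 'S' || c = 'W' ||
  c = 'K' || c = 'M' || c = 'B' || c = 'D' || c = 'H' || c = 'V' || c = 'N' || c = '.'

def pvValidMotif : List Char → Bool → Bool
  | [], inB => !inB
  | c :: cs, true => if c = ']' then pvValidMotif cs false else pvIsIupacChar c && pvValidMotif cs true
  | c :: cs, false => if c = '[' then pvValidMotif cs true else pvIsIupacChar c && pvValidMotif cs false

def Pre_parse_motif_to_symbol_sets (motif : String) : Prop :=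
  (PySem.Str.upper (PySem.Str.strip motif)).toList ≠ [] ∧
  pvValidMotif (PySem.Str.upper (PySem.Str.strip motif)).toList false = true

instance (motif : String) : Decidable (Pre_parse_motif_to_symbol_sets motif) := by
  unfold Pre_parse_motif_to_symbol_sets; infer_instance

def pvWitness_parse_motif_to_symbol_sets : String := "ac[GT.]N[]R"

def Spec_parse_motif_to_symbol_sets (motif : String) (out : List (List String)) : Prop := out = parse_motif_to_symbol_sets_alt motif
instance (motif : String) (out : List (List String)) : Decidable (Spec_parse_motif_to_symbol_sets motif out) := by unfold Spec_parse_motif_to_symbol_sets; infer_instance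

-- ===== CLAIM (what is proved, stated in full; the proofs are below) =====
def Claim_equal_parse_motif_to_symbol_sets : Prop := ∀ (motif : String), Dom_parse_motif_to_symbol_sets motif → Pre_parse_motif_to_symbol_sets motif → Spec_parse_motif_to_symbol_sets motif (parse_motif_to_symbol_sets motif)

-- ===== LEMMAS AND PROOFS =====

theorem islower_upperChar (c : Char) : PySem.Chars.islower (PySem.Chars.upperChar c) = false := by
  unfold PySem.Chars.upperChar
  by_cases h : PySem.Chars.islower c = true
  · simp only [h, if_true]
    unfold PySem.Chars.islower at *
    simp only [Bool.and_eq_true, decide_eq_true_eq, Char.le_def, UInt32.le_iff_toNat_le] at h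
    obtain ⟨h1, h2⟩ : 97 ≤ c.toNat ∧ c.toNat ≤ 122 := h
    have hv : (c.toNat - 32).isValidChar := Or.inl (by omega)
    have hn : (Char.ofNat (c.toNat - 32)).toNat = c.toNat - 32 := by
      rw [Char.toNat_ofNat, if_pos hv]
    have : ¬ ('a' ≤ Char.ofNat (c.toNat - 32)) := by
      rw [Char.le_def, UInt32.le_iff_toNat_le]
      show ¬ (97 ≤ (Char.ofNat (c.toNat - 32)).toNat)
      omega
    simp [this]
  · simp only [h]
    simpa using h

theorem upperChar_idem (c : Char) :
    PySem.Chars.upperChar (PySem.Chars.upperChar c) = PySem.Chars.upperChar c := by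
  conv_lhs => rw [PySem.Chars.upperChar]
  rw [islower_upperChar c]
  simp

-- B's bracket mode computes exactly A's bracket helper, then resumes in normal mode
theorem bracket_eq (cs : List Char) :
    ∀ (acc : PySem.Set String) (pieces : List (PySem.Set String)),
      (∀ c ∈ cs, PySem.Chars.upperChar c = c) →
      flatB cs true acc pieces =
        (match bracketLoopA cs acc with
         | none => none
         | some (al, rest) => flatB rest false al (pieces ++ [al])) := by
  induction cs with
  | nil => intro acc pieces _; rfl
  | cons c cs ih =>
    intro acc pieces H
    have hc : PySem.Chars.upperChar c = c := H c (List.mem_cons_self)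
    have Hcs : ∀ d ∈ cs, PySem.Chars.upperChar d = d := fun d hd => H d (List.mem_cons_of_mem _ hd)
    by_cases h1 : c = ']'
    · subst h1; simp [flatB, bracketLoopA]
    · simp only [flatB, bracketLoopA, if_neg h1, hc]
      cases hp : pvIupac c with
      | some v => simpa [hp] using ih _ _ Hcs
      | none =>
        have hno : ¬ (c = 'A' ∨ c = 'C' ∨ c = 'G' ∨ c = 'T') := by
          rintro (rfl | rfl | rfl | rfl) <;> simp [pvIupac] at hp
        simp [hp, hno]

-- B's normal mode computes exactly A's main loop, for any stale accumulator
theorem main_eq :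
    ∀ (n : Nat) (cs : List Char), cs.length ≤ n →
      (∀ c ∈ cs, PySem.Chars.upperChar c = c) →
      ∀ (cur : PySem.Set String) (pieces : List (PySem.Set String)),
        mainLoopA cs pieces = flatB cs false cur pieces := by
  intro n
  induction n with
  | zero =>
    intro cs hlen _ cur pieces
    have : cs = [] := List.eq_nil_of_length_eq_zero (Nat.le_zero.mp hlen)
    subst this
    simp [mainLoopA, flatB]
  | succ n ih =>
    intro cs hlen H cur pieces
    cases cs with
    | nil => simp [mainLoopA, flatB]
    | cons c cs =>
      have Hcs : ∀ d ∈ cs, PySem.Chars.upperChar d = d := fun d hd => H d (List.mem_cons_of_mem _ hd)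
      by_cases h1 : c = '['
      · subst h1
        rw [mainLoopA]
        simp only [if_pos rfl, flatB]
        rw [bracket_eq cs _ _ Hcs]
        cases hb : bracketLoopA cs PySem.Set.empty with
        | none => simp
        | some p =>
          obtain ⟨al, rest⟩ := p
          obtain ⟨hlt, hsub⟩ := bracketLoopA_spec _ _ _ _ hb
          have hrest : ∀ d ∈ rest, PySem.Chars.upperChar d = d := fun d hd => Hcs d (hsub d hd)
          simp only []
          exact ih rest (by simp at hlen; omega) hrest al (pieces ++ [al])
      · rw [mainLoopA]
        simp only [if_neg h1, flatB]
        cases hp : pvIupac c with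
        | some v => simpa [hp] using ih cs (by simp at hlen; omega) Hcs cur (pieces ++ [v])
        | none => simp [hp]

theorem ports_agree (motif : String) :
    parse_motif_to_symbol_sets motif = parse_motif_to_symbol_sets_alt motif := by
  unfold parse_motif_to_symbol_sets parse_motif_to_symbol_sets_alt
  have H : ∀ c ∈ (PySem.Str.upper (PySem.Str.strip motif)).toList,
      PySem.Chars.upperChar c = c := by
    intro c hc
    rw [PySem.Str.toList_upper] at hc
    unfold PySem.Chars.upper at hc
    obtain ⟨d, _, rfl⟩ := List.mem_map.mp hc
    exact upperChar_idem d
  by_cases he : (PySem.Str.upper (PySem.Str.strip motif)).toList.isEmpty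
  · rw [if_pos he, if_pos he]
  · rw [if_neg he, if_neg he]
    rw [main_eq _ _ le_rfl H PySem.Set.empty []]

-- ===== VERDICT (by name: the statement is the Claim_ definition above) =====
theorem parse_motif_to_symbol_sets_spec : Claim_equal_parse_motif_to_symbol_sets := by
  intro motif _ _
  unfold Spec_parse_motif_to_symbol_sets
  exact ports_agree motif
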